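-- pv_equiv track=rewrite | github.com/Auto-Mech/mechdriver | routines/pf/ktp/fit/_fit.py | gen_reaction_pairs
-- ===== SOURCE A (Python) =====
-- def gen_reaction_pairs(label_dct):
--     """ Generate pairs of reactions
--     """
--     rxn_pairs = ()
--     for name_i, lab_i in label_dct.items():
--         if 'F' not in lab_i and 'B' not in lab_i:
--             for name_j, lab_j in label_dct.items():
--                 if 'F' not in lab_j and 'B' not in lab_j and lab_i != lab_j:
--                     rxn_pairs += (((name_i, lab_i), (name_j, lab_j)),)
--
--     sorted_rxn_pairs = ()
--     for pair in rxn_pairs: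
--         rct, prd = pair
--         if (rct, prd) in sorted_rxn_pairs or (prd, rct) in sorted_rxn_pairs:
--             continue
--         else:
--             sorted_rxn_pairs += ((rct, prd),)
--
--     return sorted_rxn_pairs
-- ===== SOURCE B (Python) =====
-- from itertools import combinations
--
--
-- def gen_reaction_pairs(label_dct):
--     """ Generate pairs of reactions
--     """
--     valid = [(name, lab) for name, lab in label_dct.items()
--              if 'F' not in lab and 'B' not in lab]
--     return tuple((rct, prd) for rct, prd in combinations(valid, 2)
--                  if rct[1] != prd[1])
-- ===== Notes on version B (the rewrite author's own statement) =====
-- stated objective: faster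
-- what changed: Replaces A's quadratic generation of both orientations followed by a rescan-based dedup pass (which re-scans the growing output tuple for every pair) with a single itertools.combinations pass over the pre-filtered valid items, which emits each unordered pair exactly once in A's first-seen orientation and order.
import Mathlib
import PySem

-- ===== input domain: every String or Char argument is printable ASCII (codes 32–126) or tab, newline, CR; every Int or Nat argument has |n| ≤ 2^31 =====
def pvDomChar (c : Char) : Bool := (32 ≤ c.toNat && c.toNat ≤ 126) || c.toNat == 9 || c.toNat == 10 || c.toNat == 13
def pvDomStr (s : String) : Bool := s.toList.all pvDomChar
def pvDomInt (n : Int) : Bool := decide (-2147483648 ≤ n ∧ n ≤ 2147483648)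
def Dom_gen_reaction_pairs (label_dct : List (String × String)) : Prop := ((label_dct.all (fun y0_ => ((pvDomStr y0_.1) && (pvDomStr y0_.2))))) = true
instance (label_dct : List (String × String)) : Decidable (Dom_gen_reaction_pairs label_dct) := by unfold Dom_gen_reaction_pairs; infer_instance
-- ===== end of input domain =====

-- B replaces A's two-orientation nested generation plus rescan-based dedup pass by a single
-- combinations pass over the pre-filtered valid items (faster in a timing run; no mutation).

-- shared helper: Python's  'F' not in lab and 'B' not in lab  (both Source A and Source B use this test verbatim)
def pvNoFB (lab : String) : Bool := !(PySem.Str.isIn "F" lab) && !(PySem.Str.isIn "B" lab)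

-- ===== PORT A =====
def gen_reaction_pairs (label_dct : List (String × String)) : List ((String × String) × (String × String)) :=
  -- first loop: all ordered pairs of valid items with differing labels
  let rxn_pairs : List ((String × String) × (String × String)) :=
    label_dct.foldl (fun acc i =>
      if pvNoFB i.2 then
        label_dct.foldl (fun acc2 j =>
          if pvNoFB j.2 && i.2 != j.2 then acc2 ++ [(i, j)] else acc2) acc
      else acc) []
  -- second loop: keep a pair unless it or its reversal was already kept
  rxn_pairs.foldl (fun acc pair =>
    if (pair.1, pair.2) ∈ acc ∨ (pair.2, pair.1) ∈ acc then acc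
    else acc ++ [(pair.1, pair.2)]) []

-- ===== PORT B =====
-- itertools.combinations(xs, 2) as ordered pairs
def pvCombinations2 {α : Type} : List α → List (α × α)
  | [] => []
  | x :: xs => xs.map (fun y => (x, y)) ++ pvCombinations2 xs

def gen_reaction_pairs_alt (label_dct : List (String × String)) : List ((String × String) × (String × String)) :=
  let valid := label_dct.filter (fun p => pvNoFB p.2)
  (pvCombinations2 valid).filter (fun pr => pr.1.2 != pr.2.2)

-- ===== PRECONDITION & SPEC =====
-- Pre_: the association list stands for a Python dict, whose keys are necessarily pairwise
-- distinct; lists with duplicate keys correspond to no Python input and are excluded.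
def Pre_gen_reaction_pairs (label_dct : List (String × String)) : Prop :=
  (label_dct.map Prod.fst).Nodup
instance (label_dct : List (String × String)) : Decidable (Pre_gen_reaction_pairs label_dct) := by unfold Pre_gen_reaction_pairs; infer_instance

def pvWitness_gen_reaction_pairs : (List (String × String)) := [("r1", "p"), ("r2", "q")]

def Spec_gen_reaction_pairs (label_dct : List (String × String)) (out : List ((String × String) × (String × String))) : Prop := out = gen_reaction_pairs_alt label_dct
instance (label_dct : List (String × String)) (out : List ((String × String) × (String × String))) : Decidable (Spec_gen_reaction_pairs label_dct out) := by unfold Spec_gen_reaction_pairs; infer_instance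

-- ===== CLAIM (what is proved, stated in full; the proofs are below) =====
def Claim_equal_gen_reaction_pairs : Prop := ∀ (label_dct : List (String × String)), Dom_gen_reaction_pairs label_dct → Pre_gen_reaction_pairs label_dct → Spec_gen_reaction_pairs label_dct (gen_reaction_pairs label_dct)

-- ===== LEMMAS AND PROOFS =====

-- the row of ordered pairs A's inner loop produces for a fixed valid item `a` scanning `s`
def pvRow (a : String × String) (s : List (String × String)) : List ((String × String) × (String × String)) :=
  (s.filter (fun b => a.2 != b.2)).map (fun b => (a, b))

-- A's dedup step, named
def pvDD (acc : List ((String × String) × (String × String))) (pair : (String × String) × (String × String)) : List ((String × String) × (String × String)) :=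
  if (pair.1, pair.2) ∈ acc ∨ (pair.2, pair.1) ∈ acc then acc else acc ++ [(pair.1, pair.2)]

-- the survivors after processing the rows of the prefix p (suffix s still to come)
def pvAgg : List (String × String) → List (String × String) → List ((String × String) × (String × String))
  | [], _ => []
  | a :: p, s => pvRow a (p ++ s) ++ pvAgg p s

theorem pvInner (i : String × String) (l : List (String × String))
    (acc : List ((String × String) × (String × String))) :
    l.foldl (fun acc2 j => if pvNoFB j.2 && i.2 != j.2 then acc2 ++ [(i, j)] else acc2) acc
      = acc ++ pvRow i (l.filter (fun p => pvNoFB p.2)) := by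
  induction l generalizing acc with
  | nil => simp [pvRow]
  | cons j l ih =>
    rw [List.foldl_cons]
    by_cases h1 : pvNoFB j.2
    · by_cases h2 : (i.2 != j.2) = true
      · rw [if_pos (by simp [h1, h2]), ih]
        simp [pvRow, h1, h2]
      · rw [if_neg (by simp [h1, h2]), ih]
        simp [pvRow, h1, h2]
    · rw [if_neg (by simp [h1]), ih]
      simp [pvRow, h1]

theorem pvOuter (L l : List (String × String))
    (acc : List ((String × String) × (String × String))) :
    l.foldl (fun acc i =>
      if pvNoFB i.2 then
        L.foldl (fun acc2 j => if pvNoFB j.2 && i.2 != j.2 then acc2 ++ [(i, j)] else acc2) acc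
      else acc) acc
      = acc ++ (l.filter (fun p => pvNoFB p.2)).flatMap (fun i => pvRow i (L.filter (fun p => pvNoFB p.2))) := by
  induction l generalizing acc with
  | nil => simp
  | cons i l ih =>
    rw [List.foldl_cons]
    by_cases h : pvNoFB i.2
    · rw [if_pos h, pvInner, ih]
      simp [h, List.append_assoc]
    · rw [if_neg h, ih]
      simp [h]

theorem pvAgg_fst {p s : List (String × String)} {c d : String × String}
    (h : (c, d) ∈ pvAgg p s) : c ∈ p := by
  induction p generalizing s with
  | nil => simp [pvAgg] at h
  | cons a p ih =>
    simp only [pvAgg, List.mem_append] at h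
    rcases h with h | h
    · simp only [pvRow, List.mem_map] at h
      rcases h with ⟨b, _, heq⟩
      have : a = c := congrArg Prod.fst heq
      exact this ▸ List.mem_cons_self
    · exact List.mem_cons_of_mem _ (ih h)

theorem pvAgg_mem {p s : List (String × String)} {b x : String × String}
    (hb : b ∈ p) (hx : x ∈ s) (hne : (b.2 != x.2) = true) : (b, x) ∈ pvAgg p s := by
  induction p generalizing s with
  | nil => simp at hb
  | cons a p ih =>
    simp only [pvAgg, List.mem_append]
    rcases List.mem_cons.mp hb with rfl | hb
    · left
      simp only [pvRow, List.mem_map, List.mem_filter]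
      exact ⟨x, ⟨List.mem_append_right _ hx, hne⟩, rfl⟩
    · right; exact ih hb hx

theorem pvAgg_snoc (p : List (String × String)) (x : String × String) (s : List (String × String)) :
    pvAgg (p ++ [x]) s = pvAgg p (x :: s) ++ pvRow x s := by
  induction p with
  | nil => simp [pvAgg]
  | cons a p ih => simp [pvAgg, ih, List.append_assoc]

theorem pvFoldDD_skip (prs : List ((String × String) × (String × String)))
    (acc : List ((String × String) × (String × String)))
    (h : ∀ pr ∈ prs, (pr.2, pr.1) ∈ acc) :
    prs.foldl pvDD acc = acc := by
  induction prs with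
  | nil => rfl
  | cons pr prs ih =>
    have h1 : (pr.2, pr.1) ∈ acc := h pr (List.mem_cons_self)
    have : pvDD acc pr = acc := by simp [pvDD, h1]
    rw [List.foldl_cons, this]
    exact ih (fun q hq => h q (List.mem_cons_of_mem _ hq))

theorem pvFoldDD_append (prs : List ((String × String) × (String × String)))
    (acc : List ((String × String) × (String × String)))
    (h1 : ∀ pr ∈ prs, pr ∉ acc ∧ (pr.2, pr.1) ∉ acc)
    (h2 : prs.Nodup)
    (h3 : ∀ pr ∈ prs, (pr.2, pr.1) ∉ prs) :
    prs.foldl pvDD acc = acc ++ prs := by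
  induction prs generalizing acc with
  | nil => simp
  | cons pr prs ih =>
    have hm := h1 pr (List.mem_cons_self)
    have hstep : pvDD acc pr = acc ++ [pr] := by simp [pvDD, hm.1, hm.2]
    rw [List.foldl_cons, hstep]
    rw [ih (acc ++ [pr]) ?_ h2.of_cons ?_]
    · simp
    · intro q hq
      have hq1 := h1 q (List.mem_cons_of_mem _ hq)
      constructor
      · simp only [List.mem_append, List.mem_singleton]
        rintro (h | h)
        · exact hq1.1 h
        · exact absurd (h ▸ hq) (List.nodup_cons.mp h2).1
      · simp only [List.mem_append, List.mem_singleton]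
        rintro (h | h)
        · exact hq1.2 h
        · exact h3 q (List.mem_cons_of_mem _ hq) (h ▸ List.mem_cons_self)
    · intro q hq hsw
      exact h3 q (List.mem_cons_of_mem _ hq) (List.mem_cons_of_mem _ hsw)

theorem pvRow_swap_not_mem (x : String × String) (s : List (String × String))
    {pr : (String × String) × (String × String)} (hpr : pr ∈ pvRow x s) :
    (pr.2, pr.1) ∉ pvRow x s := by
  intro hsw
  simp only [pvRow, List.mem_map, List.mem_filter] at hpr hsw
  rcases hpr with ⟨b, ⟨_, hb2⟩, rfl⟩
  rcases hsw with ⟨c, ⟨_, hc2⟩, hc⟩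
  have hbx : b = x := (congrArg Prod.fst hc).symm
  simp [hbx] at hb2

theorem pvRow_nodup (x : String × String) {s : List (String × String)} (hs : s.Nodup) :
    (pvRow x s).Nodup := by
  unfold pvRow
  exact List.Nodup.map (fun a b h => congrArg Prod.snd h) (hs.filter _)

theorem pvRow_step (p : List (String × String)) (x : String × String) (s : List (String × String))
    (hnd : (p ++ x :: s).Nodup) :
    (pvRow x (p ++ x :: s)).foldl pvDD (pvAgg p (x :: s)) = pvAgg (p ++ [x]) s := by
  have hxp : x ∉ p := fun h => (List.disjoint_of_nodup_append hnd) h List.mem_cons_self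
  have hxs : x ∉ s := (List.nodup_cons.mp hnd.of_append_right).1
  have hps : ∀ b ∈ s, b ∉ p := fun b hb hbp =>
    (List.disjoint_of_nodup_append hnd) hbp (List.mem_cons_of_mem _ hb)
  have hsplit : pvRow x (p ++ x :: s) = pvRow x p ++ pvRow x s := by
    simp [pvRow, List.filter_append]
  rw [hsplit, List.foldl_append]
  have h1 : (pvRow x p).foldl pvDD (pvAgg p (x :: s)) = pvAgg p (x :: s) := by
    apply pvFoldDD_skip
    intro pr hpr
    simp only [pvRow, List.mem_map, List.mem_filter] at hpr
    rcases hpr with ⟨b, ⟨hbp, hb2⟩, rfl⟩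
    exact pvAgg_mem hbp List.mem_cons_self (by simpa [bne_iff_ne, ne_comm] using hb2)
  rw [h1, pvAgg_snoc]
  apply pvFoldDD_append
  · intro pr hpr
    simp only [pvRow, List.mem_map, List.mem_filter] at hpr
    rcases hpr with ⟨b, ⟨hbs, _⟩, rfl⟩
    constructor
    · intro h; exact hxp (pvAgg_fst h)
    · intro h; exact hps b hbs (pvAgg_fst h)
  · exact pvRow_nodup x (hnd.of_append_right).of_cons
  · exact fun pr hpr => pvRow_swap_not_mem x s hpr

theorem pvMain (s p : List (String × String)) (hnd : (p ++ s).Nodup) :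
    (s.flatMap (fun i => pvRow i (p ++ s))).foldl pvDD (pvAgg p s) = pvAgg (p ++ s) [] := by
  induction s generalizing p with
  | nil => simp
  | cons x s ih =>
    rw [List.flatMap_cons, List.foldl_append, pvRow_step p x s hnd]
    have heq : (p ++ [x]) ++ s = p ++ x :: s := by simp
    rw [← heq] at hnd ⊢
    exact ih (p ++ [x]) hnd

theorem pvAgg_eq_comb (v : List (String × String)) :
    pvAgg v [] = (pvCombinations2 v).filter (fun pr => pr.1.2 != pr.2.2) := by
  induction v with
  | nil => simp [pvAgg, pvCombinations2]
  | cons a v ih =>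
    simp only [pvAgg, pvCombinations2, List.append_nil, List.filter_append, ih]
    congr 1
    rw [List.filter_map]
    rfl

-- ===== VERDICT (by name: the statement is the Claim_ definition above) =====
theorem gen_reaction_pairs_spec : Claim_equal_gen_reaction_pairs := by
  intro l _ hpre
  unfold Spec_gen_reaction_pairs
  simp only [gen_reaction_pairs, gen_reaction_pairs_alt]
  have hnd : (l.filter (fun p => pvNoFB p.2)).Nodup :=
    (List.Nodup.of_map _ hpre).filter _
  rw [pvOuter l l []]
  rw [List.nil_append]
  have hDD : (fun (acc : List ((String × String) × (String × String))) pair =>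
      if (pair.1, pair.2) ∈ acc ∨ (pair.2, pair.1) ∈ acc then acc
      else acc ++ [(pair.1, pair.2)]) = pvDD := rfl
  rw [hDD]
  have h := pvMain (l.filter (fun p => pvNoFB p.2)) [] (by simpa using hnd)
  rw [List.nil_append] at h
  rw [show pvAgg [] (l.filter (fun p => pvNoFB p.2)) = [] from rfl] at h
  rw [h, pvAgg_eq_comb]
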